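-- pv_equiv track=rewrite | github.com/rickyflows/project-euler | p84.py | handle_chance_strs
-- ===== SOURCE A (Python) =====
-- BOARD_SIZE = 40
--
-- NEXT_R = "NEXT_R"
--
-- NEXT_U = "NEXT_U"
--
-- BACK_3 = "BACK_3"
--
-- def handle_chance_strs(card, pos):
--     if card == BACK_3:
--         return (pos - 3) % BOARD_SIZE
--     elif card == NEXT_R:
--         while pos not in [5, 15, 25, 35]:
--             pos = (pos + 1) % BOARD_SIZE
--         return pos
--     elif card == NEXT_U:
--         while pos not in [12, 28]:
--             pos = (pos + 1) % BOARD_SIZE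
--         return pos
-- ===== SOURCE B (Python) =====
-- BOARD_SIZE = 40
--
-- NEXT_R = "NEXT_R"
--
-- NEXT_U = "NEXT_U"
--
-- BACK_3 = "BACK_3"
--
-- def handle_chance_strs(card, pos):
--     if card == BACK_3:
--         return (pos - 3) % BOARD_SIZE
--     if card == NEXT_R:
--         if pos in (5, 15, 25, 35):
--             return pos
--         r = (pos + 1) % BOARD_SIZE
--         return (r + (5 - r) % 10) % BOARD_SIZE
--     if card == NEXT_U:
--         if pos in (12, 28):
--             return pos
--         r = (pos + 1) % BOARD_SIZE
--         return 12 if r <= 12 else (28 if r <= 28 else 12)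
--     return None
-- ===== Notes on version B (the rewrite author's own statement) =====
-- stated objective: simpler
-- what changed: Replaces A's step-by-step while-loops (advance one square mod 40 until a railway/utility is hit) with a closed-form arithmetic computation of the destination: railways lie at residue 5 mod 10, utilities at 12 and 28, so one modular formula / cutoff chain gives the answer directly.
import Mathlib
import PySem

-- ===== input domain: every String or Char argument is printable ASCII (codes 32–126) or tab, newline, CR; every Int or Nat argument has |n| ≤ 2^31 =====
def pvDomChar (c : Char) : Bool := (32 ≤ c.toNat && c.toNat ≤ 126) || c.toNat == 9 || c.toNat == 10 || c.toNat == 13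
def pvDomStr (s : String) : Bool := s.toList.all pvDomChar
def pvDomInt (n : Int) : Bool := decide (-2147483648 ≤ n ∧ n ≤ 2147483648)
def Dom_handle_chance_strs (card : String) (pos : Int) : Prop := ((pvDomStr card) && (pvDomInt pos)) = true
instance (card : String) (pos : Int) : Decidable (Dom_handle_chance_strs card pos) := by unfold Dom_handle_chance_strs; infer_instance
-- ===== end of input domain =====

-- B replaces A's position-by-position while-loops with a closed-form arithmetic destination (simpler, one shot).

-- ===== PORT A =====
-- A's 'while pos not in targets: pos = (pos+1) % 40' loop; the fuel argument is only a
-- totality guard: one step reduces pos into [0,40) and at most 39 more steps reach a target,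
-- so fuel 41 is never exhausted (proved below).
def chanceLoop (targets : List Int) : Nat → Int → Int
  | 0, pos => pos
  | f + 1, pos => if pos ∈ targets then pos else chanceLoop targets f (PySem.Int.mod (pos + 1) 40)

def handle_chance_strs (card : String) (pos : Int) : Option Int :=
  if card = "BACK_3" then some (PySem.Int.mod (pos - 3) 40)
  else if card = "NEXT_R" then some (chanceLoop [5, 15, 25, 35] 41 pos)
  else if card = "NEXT_U" then some (chanceLoop [12, 28] 41 pos)
  else none

-- ===== PORT B =====
def handle_chance_strs_alt (card : String) (pos : Int) : Option Int :=
  if card = "BACK_3" then some (PySem.Int.mod (pos - 3) 40)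
  else if card = "NEXT_R" then
    if pos = 5 ∨ pos = 15 ∨ pos = 25 ∨ pos = 35 then some pos
    else
      let r := PySem.Int.mod (pos + 1) 40
      some (PySem.Int.mod (r + PySem.Int.mod (5 - r) 10) 40)
  else if card = "NEXT_U" then
    if pos = 12 ∨ pos = 28 then some pos
    else
      let r := PySem.Int.mod (pos + 1) 40
      some (if r ≤ 12 then 12 else if r ≤ 28 then 28 else 12)
  else none

-- ===== PRECONDITION & SPEC =====
def Spec_handle_chance_strs (card : String) (pos : Int) (out : Option Int) : Prop := out = handle_chance_strs_alt card pos
instance (card : String) (pos : Int) (out : Option Int) : Decidable (Spec_handle_chance_strs card pos out) := by unfold Spec_handle_chance_strs; infer_instance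

-- ===== CLAIM (what is proved, stated in full; the proofs are below) =====
def Claim_equal_handle_chance_strs : Prop := ∀ (card : String) (pos : Int), Dom_handle_chance_strs card pos → Spec_handle_chance_strs card pos (handle_chance_strs card pos)

-- ===== LEMMAS AND PROOFS =====

theorem loopR_fin : ∀ n : Fin 40,
    chanceLoop [5, 15, 25, 35] 40 ((n : Nat) : Int) =
      PySem.Int.mod (((n : Nat) : Int) + PySem.Int.mod (5 - ((n : Nat) : Int)) 10) 40 := by
  decide

theorem loopU_fin : ∀ n : Fin 40,
    chanceLoop [12, 28] 40 ((n : Nat) : Int) =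
      (if ((n : Nat) : Int) ≤ 12 then 12 else if ((n : Nat) : Int) ≤ 28 then (28 : Int) else 12) := by
  decide

theorem mod40_bounds (a : Int) : 0 ≤ PySem.Int.mod a 40 ∧ PySem.Int.mod a 40 < 40 := by
  rw [PySem.Int.mod_eq_emod_of_pos (by norm_num)]
  exact ⟨Int.emod_nonneg a (by norm_num), Int.emod_lt_of_pos a (by norm_num)⟩

theorem loopR_eq (pos : Int) (h : ¬(pos = 5 ∨ pos = 15 ∨ pos = 25 ∨ pos = 35)) :
    chanceLoop [5, 15, 25, 35] 41 pos =
      PySem.Int.mod (PySem.Int.mod (pos + 1) 40 + PySem.Int.mod (5 - PySem.Int.mod (pos + 1) 40) 10) 40 := by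
  have hm : pos ∉ ([5, 15, 25, 35] : List Int) := by simpa using h
  have hb := mod40_bounds (pos + 1)
  have hn : ((PySem.Int.mod (pos + 1) 40).toNat : Int) = PySem.Int.mod (pos + 1) 40 :=
    Int.toNat_of_nonneg hb.1
  have hfin : (PySem.Int.mod (pos + 1) 40).toNat < 40 := by omega
  have := loopR_fin ⟨(PySem.Int.mod (pos + 1) 40).toNat, hfin⟩
  simp only [hn] at this
  simp only [chanceLoop, if_neg hm]
  exact this

theorem loopU_eq (pos : Int) (h : ¬(pos = 12 ∨ pos = 28)) :
    chanceLoop [12, 28] 41 pos =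
      (if PySem.Int.mod (pos + 1) 40 ≤ 12 then 12
       else if PySem.Int.mod (pos + 1) 40 ≤ 28 then (28 : Int) else 12) := by
  have hm : pos ∉ ([12, 28] : List Int) := by simpa using h
  have hb := mod40_bounds (pos + 1)
  have hn : ((PySem.Int.mod (pos + 1) 40).toNat : Int) = PySem.Int.mod (pos + 1) 40 :=
    Int.toNat_of_nonneg hb.1
  have hfin : (PySem.Int.mod (pos + 1) 40).toNat < 40 := by omega
  have := loopU_fin ⟨(PySem.Int.mod (pos + 1) 40).toNat, hfin⟩
  simp only [hn] at this
  simp only [chanceLoop, if_neg hm]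
  exact this

theorem loop_mem (targets : List Int) (pos : Int) (h : pos ∈ targets) :
    chanceLoop targets 41 pos = pos := by
  simp [chanceLoop, h]

-- ===== VERDICT (by name: the statement is the Claim_ definition above) =====
theorem handle_chance_strs_spec : Claim_equal_handle_chance_strs := by
  intro card pos _
  unfold Spec_handle_chance_strs handle_chance_strs handle_chance_strs_alt
  by_cases h3 : card = "BACK_3"
  · simp [h3]
  · by_cases hR : card = "NEXT_R"
    · simp only [if_neg h3, if_pos hR]
      by_cases hmem : pos = 5 ∨ pos = 15 ∨ pos = 25 ∨ pos = 35
      · rw [if_pos hmem, loop_mem _ _ (by simpa using hmem)]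
      · rw [if_neg hmem, loopR_eq pos hmem]
    · by_cases hU : card = "NEXT_U"
      · simp only [if_neg h3, if_neg hR, if_pos hU]
        by_cases hmem : pos = 12 ∨ pos = 28
        · rw [if_pos hmem, loop_mem _ _ (by simpa using hmem)]
        · rw [if_neg hmem, loopU_eq pos hmem]
      · simp [h3, hR, hU]
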